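-- pv_equiv track=rewrite | github.com/Devjunku/TIL | python/SWEA/2021.02.09/4834_numbercard/sol1.py | my_MaxValueIndex
-- ===== SOURCE A (Python) =====
-- def my_MaxValueIndex(x):
--     idx = 0
--     dat = x[0]
--     for i in range(1, len(x)):
--         if x[i] > dat:
--             dat = x[i]
--
--     for i in range(1, len(x)):
--         if x[i] == dat:
--             idx = i
--     return [idx, dat]
-- ===== SOURCE B (Python) =====
-- def my_MaxValueIndex(x):
--     idx, dat = 0, x[0]
--     for i, v in enumerate(x[1:], 1):
--         if v > dat:
--             idx, dat = i, v
--         elif v == dat: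
--             idx = i
--     return [idx, dat]
-- ===== Notes on version B (the rewrite author's own statement) =====
-- stated objective: simpler
-- what changed: Fuses A's two separate scans (one to find the max, one to find its last index) into a single enumerate pass that tracks (last index, max) together, resetting the index whenever a new max is found.
import Mathlib
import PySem

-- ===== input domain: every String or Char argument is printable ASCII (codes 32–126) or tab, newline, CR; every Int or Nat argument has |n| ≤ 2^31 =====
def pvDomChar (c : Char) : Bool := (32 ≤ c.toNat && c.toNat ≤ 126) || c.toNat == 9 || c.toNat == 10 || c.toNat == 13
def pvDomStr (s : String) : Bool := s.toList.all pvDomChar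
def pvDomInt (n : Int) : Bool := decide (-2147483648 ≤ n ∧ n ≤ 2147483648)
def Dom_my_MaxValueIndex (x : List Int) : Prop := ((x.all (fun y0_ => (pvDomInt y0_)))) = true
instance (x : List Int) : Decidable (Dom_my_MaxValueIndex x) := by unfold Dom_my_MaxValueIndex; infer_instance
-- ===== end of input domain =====

-- B fuses A's two scans (max, then last index of the max) into one enumerate pass tracking both; same return values.

-- ===== PORT A =====
def my_MaxValueIndex (x : List Int) : List Int :=
  match x with
  | [] => []          -- Python raises IndexError on x[0]; excluded by Pre_
  | d :: _ =>
    let dat := (PySem.List.pyRange 1 (x.length : Int) 1).foldl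
      (fun dat i => if PySem.List.pyGetD x i 0 > dat then PySem.List.pyGetD x i 0 else dat) d
    let idx := (PySem.List.pyRange 1 (x.length : Int) 1).foldl
      (fun idx i => if PySem.List.pyGetD x i 0 = dat then i else idx) (0 : Int)
    [idx, dat]

-- ===== PORT B =====
def my_MaxValueIndex_alt (x : List Int) : List Int :=
  match x with
  | [] => []          -- Python raises IndexError on x[0]; excluded by Pre_
  | d :: t =>
    let st := (PySem.List.enumerate t 1).foldl
      (fun (p : Int × Int) (e : Int × Int) =>
        if e.2 > p.2 then (e.1, e.2)
        else if e.2 = p.2 then (e.1, p.2)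
        else p) ((0 : Int), d)
    [st.1, st.2]

-- ===== PRECONDITION & SPEC =====
-- Python A raises IndexError on the empty list (x[0]); Pre_ excludes exactly that.
def Pre_my_MaxValueIndex (x : List Int) : Prop := x ≠ []
instance (x : List Int) : Decidable (Pre_my_MaxValueIndex x) := by unfold Pre_my_MaxValueIndex; infer_instance
def pvWitness_my_MaxValueIndex : List Int := [3, 7, 7, 2]
def Spec_my_MaxValueIndex (x : List Int) (out : List Int) : Prop := out = my_MaxValueIndex_alt x
instance (x : List Int) (out : List Int) : Decidable (Spec_my_MaxValueIndex x out) := by unfold Spec_my_MaxValueIndex; infer_instance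

-- ===== CLAIM (what is proved, stated in full; the proofs are below) =====
def Claim_equal_my_MaxValueIndex : Prop := ∀ (x : List Int), Dom_my_MaxValueIndex x → Pre_my_MaxValueIndex x → Spec_my_MaxValueIndex x (my_MaxValueIndex x)

-- ===== LEMMAS AND PROOFS =====

/-- running maximum of `t` with initial value `d` (A's first loop / B's `dat`). -/
def pvMax (t : List Int) (d : Int) : Int := t.foldl (fun a v => if v > a then v else a) d

/-- last index in an (index,value) list whose value equals `m`, default `i0` (A's second loop). -/
def pvIdx (l : List (Int × Int)) (m i0 : Int) : Int :=
  l.foldl (fun idx p => if p.2 = m then p.1 else idx) i0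

/-- B's fused fold. -/
def pvB (l : List (Int × Int)) (s : Int × Int) : Int × Int :=
  l.foldl (fun p e => if e.2 > p.2 then (e.1, e.2) else if e.2 = p.2 then (e.1, p.2) else p) s

theorem pvMax_cons (v : Int) (t : List Int) (d : Int) :
    pvMax (v :: t) d = pvMax t (if v > d then v else d) := rfl

theorem pvIdx_cons (s v : Int) (l : List (Int × Int)) (m i0 : Int) :
    pvIdx ((s, v) :: l) m i0 = pvIdx l m (if v = m then s else i0) := rfl

theorem pvB_cons (s v : Int) (l : List (Int × Int)) (i0 d : Int) :
    pvB ((s, v) :: l) (i0, d)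
      = pvB l (if v > d then (s, v) else if v = d then (s, d) else (i0, d)) := by
  by_cases h1 : v > d
  · simp [pvB, h1]
  · by_cases h2 : v = d <;> simp [pvB, h1, h2]

theorem le_pvMax : ∀ (t : List Int) (d : Int), d ≤ pvMax t d := by
  intro t
  induction t with
  | nil => intro d; simp [pvMax]
  | cons v t ih =>
    intro d
    rw [pvMax_cons]
    calc d ≤ (if v > d then v else d) := by split_ifs <;> omega
      _ ≤ pvMax t _ := ih _

theorem pvMax_eq_or_mem : ∀ (t : List Int) (d : Int), pvMax t d = d ∨ pvMax t d ∈ t := by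
  intro t
  induction t with
  | nil => intro d; simp [pvMax]
  | cons v t ih =>
    intro d
    rw [pvMax_cons]
    rcases ih (if v > d then v else d) with h | h
    · rw [h]
      split_ifs with hv
      · right; exact List.mem_cons_self ..
      · left; rfl
    · right; exact List.mem_cons_of_mem _ h

theorem pvIdx_indep : ∀ (t : List Int) (s i1 i2 m : Int), m ∈ t →
    pvIdx (PySem.List.enumerate t s) m i1 = pvIdx (PySem.List.enumerate t s) m i2 := by
  intro t
  induction t with
  | nil =>
    intro s i1 i2 m hm
    simp at hm
  | cons v t ih =>
    intro s i1 i2 m hm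
    rw [PySem.List.enumerate_cons, pvIdx_cons, pvIdx_cons]
    by_cases hv : v = m
    · rw [if_pos hv, if_pos hv]
    · rw [if_neg hv, if_neg hv]
      have hmt : m ∈ t := by
        rcases List.mem_cons.mp hm with h | h
        · exact absurd h.symm hv
        · exact h
      exact ih (s + 1) i1 i2 m hmt

theorem pvB_eq : ∀ (t : List Int) (s d i0 : Int),
    pvB (PySem.List.enumerate t s) (i0, d)
      = (pvIdx (PySem.List.enumerate t s) (pvMax t d) i0, pvMax t d) := by
  intro t
  induction t with
  | nil =>
    intro s d i0
    simp [pvB, pvIdx, pvMax, PySem.List.enumerate_nil]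
  | cons v t ih =>
    intro s d i0
    rw [PySem.List.enumerate_cons, pvB_cons, pvIdx_cons, pvMax_cons]
    by_cases h1 : v > d
    · rw [if_pos h1, if_pos h1, ih (s + 1) v s]
      by_cases h2 : v = pvMax t v
      · rw [if_pos h2]
      · rw [if_neg h2]
        have hmem : pvMax t v ∈ t :=
          (pvMax_eq_or_mem t v).resolve_left (fun h => h2 h.symm)
        rw [pvIdx_indep t (s + 1) s i0 _ hmem]
    · rw [if_neg h1, if_neg h1]
      by_cases heq : v = d
      · rw [if_pos heq, ih (s + 1) d s]
        by_cases h2 : v = pvMax t d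
        · rw [if_pos h2]
        · rw [if_neg h2]
          have hd2 : pvMax t d ≠ d := by
            intro h
            rw [heq] at h2
            exact h2 h.symm
          have hmem : pvMax t d ∈ t := (pvMax_eq_or_mem t d).resolve_left hd2
          rw [pvIdx_indep t (s + 1) s i0 _ hmem]
      · rw [if_neg heq, ih (s + 1) d i0]
        have h2 : ¬ v = pvMax t d := by
          have := le_pvMax t d
          omega
        rw [if_neg h2]

theorem enum_bridge (d : Int) (t : List Int) :
    (PySem.List.pyRange 1 ((d :: t).length : Int)).map
      (fun j => (j, PySem.List.pyGetD (d :: t) j 0)) = PySem.List.enumerate t 1 := by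
  have h := PySem.List.enumerate_eq_map_pyRange (d :: t) (0 : Int)
  rw [PySem.List.len_eq, PySem.List.pyRange_one_cons (by simp), List.map_cons,
      PySem.List.enumerate_cons, show ((0 : Int) + 1) = 1 by norm_num] at h
  exact ((List.cons_eq_cons.mp h).2).symm

-- ===== VERDICT (by name: the statement is the Claim_ definition above) =====
theorem my_MaxValueIndex_spec : Claim_equal_my_MaxValueIndex := by
  intro x _ hpre
  unfold Spec_my_MaxValueIndex
  match x with
  | [] => exact absurd rfl hpre
  | d :: t =>
    simp only [my_MaxValueIndex, my_MaxValueIndex_alt]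
    -- A's first loop equals pvMax t d
    have hdat : (PySem.List.pyRange 1 (((d :: t).length : Int))).foldl
        (fun dat i => if PySem.List.pyGetD (d :: t) i 0 > dat then PySem.List.pyGetD (d :: t) i 0 else dat) d
        = pvMax t d := by
      have := PySem.List.foldl_pyRange_pyGetD' (d :: t) (0 : Int)
        (fun a v => if v > a then v else a) d (a := 1) (by omega)
      simpa [pvMax] using this
    -- A's second loop is pvIdx over enumerate t 1
    have hidx : ∀ m : Int, (PySem.List.pyRange 1 (((d :: t).length : Int))).foldl
        (fun idx i => if PySem.List.pyGetD (d :: t) i 0 = m then i else idx) (0 : Int)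
        = pvIdx (PySem.List.enumerate t 1) m 0 := by
      intro m
      rw [pvIdx, ← enum_bridge d t, List.foldl_map]
    -- B's fused loop
    have hB := pvB_eq t 1 d 0
    simp only [pvB] at hB
    rw [hdat, hidx, hB]
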